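-- pv_equiv track=rewrite | github.com/mdpy-dev/mdpy | mdpy/file/charmm_file.py | _fine_top_info
-- ===== SOURCE A (Python) =====
-- def _fine_top_info(info):
--     new_info = []
--     start_index = 0
--     for cur_index, cur_info in enumerate(info):
--         if cur_info.startswith('RESI') or cur_info.startswith('PRES'):
--             new_info.append(info[start_index:cur_index])
--             start_index = cur_index
--     new_info.append(info[start_index:])
--     new_info = new_info[1:]
--     info_dict = {}
--     for info in new_info:
--         key = info[0].split()[1]
--         remove_list = [i for i in info if not i.startswith('ATOM')]
--         [info.remove(i) for i in remove_list]
--         info_dict[key] = [i.strip().split('!')[0].split() for i in info]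
--     return info_dict
-- ===== SOURCE B (Python) =====
-- def _fine_top_info(info):
--     info_dict = {}
--     key = None
--     for line in info:
--         if line.startswith('RESI') or line.startswith('PRES'):
--             key = line.split()[1]
--             info_dict[key] = []
--         elif line.startswith('ATOM') and key is not None:
--             info_dict[key].append(line.strip().split('!')[0].split())
--     return info_dict
-- ===== Notes on version B (the rewrite author's own statement) =====
-- stated objective: simpler
-- what changed: Replaced the two-pass block-splitting (slice at each RESI/PRES header, drop the leading block, then per-block in-place remove of non-ATOM lines) by a single pass over the lines with a current-key variable that resets the dict entry at each header and appends parsed ATOM lines to it.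
import Mathlib
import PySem

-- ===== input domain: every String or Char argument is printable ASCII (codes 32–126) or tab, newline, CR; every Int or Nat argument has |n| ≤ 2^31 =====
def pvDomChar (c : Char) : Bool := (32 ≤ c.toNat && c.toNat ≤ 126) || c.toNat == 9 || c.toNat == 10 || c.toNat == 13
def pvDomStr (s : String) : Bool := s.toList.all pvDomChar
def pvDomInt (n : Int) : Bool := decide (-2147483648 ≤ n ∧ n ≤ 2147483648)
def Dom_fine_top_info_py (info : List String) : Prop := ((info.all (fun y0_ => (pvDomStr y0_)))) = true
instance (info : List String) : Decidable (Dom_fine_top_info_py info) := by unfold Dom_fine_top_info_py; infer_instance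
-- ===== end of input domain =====

-- B replaces A's two-pass block-splitting (slices at headers, then per-block remove of
-- non-ATOM lines) by one pass with a current-key variable; objective: simpler.

-- helpers shared verbatim by both Pythons (header test, key extraction, ATOM-line parse)
def pvIsHeader (s : String) : Bool :=
  PySem.Str.startswith s "RESI" || PySem.Str.startswith s "PRES"

def pvKeyOf (s : String) : String :=
  (PySem.List.pyGet? (PySem.Str.split₀ s) 1).getD ""

def pvParseLine (s : String) : List String :=
  PySem.Str.split₀ ((PySem.List.pyGet? ((PySem.Str.split? (PySem.Str.strip s) "!").getD []) 0).getD "")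

-- ===== PORT A =====
-- the body of A's first loop (split info into blocks at RESI/PRES headers)
def pvSplitStepA (info : List String) (st : List (List String) × Int) (p : Int × String) :
    List (List String) × Int :=
  if pvIsHeader p.2 then (st.1 ++ [PySem.List.slice info (some st.2) (some p.1)], p.1)
  else st

-- the body of A's second loop (one block -> one dict entry)
def pvBlockStepA (d : PySem.Dict String (List (List String))) (block : List String) :
    PySem.Dict String (List (List String)) :=
  let key := pvKeyOf ((PySem.List.pyGet? block 0).getD "")
  let removeList := block.filter (fun i => !(PySem.Str.startswith i "ATOM"))
  let block := removeList.foldl (fun acc i => (PySem.List.remove? acc i).getD acc) block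
  d.insert key (block.map pvParseLine)

def fine_top_info_py (info : List String) : List (String × List (List String)) :=
  let r := (PySem.List.enumerate info 0).foldl (pvSplitStepA info) ([], 0)
  let newInfo := r.1 ++ [PySem.List.slice info (some r.2) none]
  let newInfo2 := PySem.List.slice newInfo (some 1) none
  (newInfo2.foldl pvBlockStepA PySem.Dict.empty).items

-- ===== PORT B =====
-- the body of B's single loop: state = (dict so far, current key)
def pvStepB (st : PySem.Dict String (List (List String)) × Option String) (line : String) :
    PySem.Dict String (List (List String)) × Option String :=
  if pvIsHeader line then
    let key := pvKeyOf line
    (st.1.insert key [], some key)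
  else if PySem.Str.startswith line "ATOM" then
    match st.2 with
    | some k => (st.1.modify k [] (fun v => v ++ [pvParseLine line]), some k)
    | none => st
  else st

def fine_top_info_py_alt (info : List String) : List (String × List (List String)) :=
  (info.foldl pvStepB (PySem.Dict.empty, none)).1.items

-- ===== PRECONDITION & SPEC =====
-- Pre_ excludes exactly the inputs on which A raises IndexError: a RESI/PRES header line
-- with fewer than two whitespace-separated tokens (info[0].split()[1] fails).
def Pre_fine_top_info_py (info : List String) : Prop :=
  ∀ s ∈ info, pvIsHeader s = true → 2 ≤ (PySem.Str.split₀ s).length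
instance (info : List String) : Decidable (Pre_fine_top_info_py info) := by
  unfold Pre_fine_top_info_py; infer_instance

def pvWitness_fine_top_info_py : List String :=
  ["RESI ALA 0", "ATOM N NH1 -0.47", "BOND N C", "PRES DEL 1", "ATOM HT X 0 ! c"]

def Spec_fine_top_info_py (info : List String) (out : List (String × List (List String))) : Prop := out = fine_top_info_py_alt info
instance (info : List String) (out : List (String × List (List String))) : Decidable (Spec_fine_top_info_py info out) := by unfold Spec_fine_top_info_py; infer_instance

-- ===== CLAIM (what is proved, stated in full; the proofs are below) =====
def Claim_equal_fine_top_info_py : Prop := ∀ (info : List String), Dom_fine_top_info_py info → Pre_fine_top_info_py info → Spec_fine_top_info_py info (fine_top_info_py info)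

-- ===== LEMMAS AND PROOFS =====

-- the common reference: one pass carrying the dict so far and the open (key, atoms) block
def pvFlush (d : PySem.Dict String (List (List String)))
    (cur : Option (String × List (List String))) : PySem.Dict String (List (List String)) :=
  match cur with
  | none => d
  | some (k, v) => d.insert k v

def pvGo (d : PySem.Dict String (List (List String)))
    (cur : Option (String × List (List String))) :
    List String → PySem.Dict String (List (List String))
  | [] => pvFlush d cur
  | l :: ls =>
    if pvIsHeader l then pvGo (pvFlush d cur) (some (pvKeyOf l, [])) ls
    else if PySem.Str.startswith l "ATOM" then
      pvGo d (cur.map (fun p => (p.1, p.2 ++ [pvParseLine l]))) ls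
    else pvGo d cur ls

theorem pvGo_cons (d : PySem.Dict String (List (List String)))
    (cur : Option (String × List (List String))) (l : String) (ls : List String) :
    pvGo d cur (l :: ls) =
      if pvIsHeader l then pvGo (pvFlush d cur) (some (pvKeyOf l, [])) ls
      else if PySem.Str.startswith l "ATOM" then
        pvGo d (cur.map (fun p => (p.1, p.2 ++ [pvParseLine l]))) ls
      else pvGo d cur ls := rfl

theorem pv_modify_insert_self (d : PySem.Dict String (List (List String)))
    (k : String) (v : List (List String)) (f : List (List String) → List (List String)) :
    (d.insert k v).modify k [] f = d.insert k (f v) := by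
  simp [PySem.Dict.modify, PySem.Dict.getD_insert_self, PySem.Dict.insert_insert_self]

-- step lemmas for B's loop body
theorem pvStepB_header (st : PySem.Dict String (List (List String)) × Option String)
    (l : String) (hh : pvIsHeader l = true) :
    pvStepB st l = (st.1.insert (pvKeyOf l) [], some (pvKeyOf l)) := by
  simp only [pvStepB, hh]
  simp

theorem pvStepB_atom (d : PySem.Dict String (List (List String))) (k : String)
    (l : String) (hh : ¬ pvIsHeader l = true) (ha : PySem.Str.startswith l "ATOM" = true) :
    pvStepB (d, some k) l = (d.modify k [] (fun v => v ++ [pvParseLine l]), some k) := by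
  simp only [pvStepB, hh, ha]
  simp

theorem pvStepB_atom_none (d : PySem.Dict String (List (List String)))
    (l : String) (hh : ¬ pvIsHeader l = true) (ha : PySem.Str.startswith l "ATOM" = true) :
    pvStepB (d, none) l = (d, none) := by
  simp only [pvStepB, hh, ha]
  simp

theorem pvStepB_other (st : PySem.Dict String (List (List String)) × Option String)
    (l : String) (hh : ¬ pvIsHeader l = true) (ha : ¬ PySem.Str.startswith l "ATOM" = true) :
    pvStepB st l = st := by
  simp only [pvStepB, hh, ha]
  simp

-- B's fold equals pvGo
theorem pvB_go (ls : List String) :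
    ∀ (d : PySem.Dict String (List (List String)))
      (cur : Option (String × List (List String))),
    (ls.foldl pvStepB (pvFlush d cur, cur.map (fun p => p.1))).1 = pvGo d cur ls := by
  induction ls with
  | nil => intro d cur; simp [pvGo]
  | cons l ls ih =>
    intro d cur
    rw [List.foldl_cons, pvGo_cons]
    by_cases hh : pvIsHeader l = true
    · rw [if_pos hh, pvStepB_header _ _ hh]
      have h1 := ih (pvFlush d cur) (some (pvKeyOf l, []))
      simpa [pvFlush] using h1
    · rw [if_neg hh]
      by_cases ha : PySem.Str.startswith l "ATOM" = true
      · rw [if_pos ha]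
        cases cur with
        | none =>
          rw [show pvFlush d none = d from rfl, show (none : Option (String × List (List String))).map (fun p => p.1) = none from rfl]
          rw [pvStepB_atom_none _ _ hh ha]
          have h1 := ih d none
          simpa [pvFlush] using h1
        | some p =>
          obtain ⟨k, v⟩ := p
          rw [show pvFlush d (some (k, v)) = d.insert k v from rfl]
          rw [show (some (k, v)).map (fun p : String × List (List String) => p.1) = some k from rfl]
          rw [pvStepB_atom _ _ _ hh ha, pv_modify_insert_self]
          have h1 := ih d (some (k, v ++ [pvParseLine l]))
          simpa [pvFlush] using h1
      · rw [if_neg ha, pvStepB_other _ _ hh ha]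
        exact ih d cur

-- A's block splitter, recursively
def pvChunks (acc : List String) : List String → List (List String)
  | [] => [acc]
  | l :: ls => if pvIsHeader l then acc :: pvChunks [l] ls else pvChunks (acc ++ [l]) ls

theorem pvChunks_cons (acc : List String) (l : String) (ls : List String) :
    pvChunks acc (l :: ls) =
      if pvIsHeader l then acc :: pvChunks [l] ls else pvChunks (acc ++ [l]) ls := rfl

theorem pvChunks_tail (ls : List String) :
    ∀ (a b : List String), (pvChunks a ls).tail = (pvChunks b ls).tail := by
  induction ls with
  | nil => intro a b; simp [pvChunks]
  | cons l ls ih =>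
    intro a b
    rw [pvChunks_cons, pvChunks_cons]
    by_cases hh : pvIsHeader l = true
    · rw [if_pos hh, if_pos hh]
      simp
    · rw [if_neg hh, if_neg hh]; exact ih _ _

-- A's enumerate fold produces exactly the chunks
theorem pvA_chunks (info : List String) (suf : List String) :
    ∀ (i s : ℕ) (acc : List (List String)), info.drop i = suf → s ≤ i →
    (let r := (PySem.List.enumerate suf (i : Int)).foldl (pvSplitStepA info) (acc, (s : Int));
     r.1 ++ [PySem.List.slice info (some r.2) none]) =
    acc ++ pvChunks ((info.drop s).take (i - s)) suf := by
  induction suf with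
  | nil =>
    intro i s acc hdrop hsi
    have hlen := congrArg List.length hdrop
    simp at hlen
    have htake : (info.drop s).take (i - s) = info.drop s := by
      apply List.take_of_length_le
      simp
      omega
    simp [PySem.List.enumerate_nil, pvChunks, PySem.List.slice_from_natCast, htake]
  | cons l ls ih =>
    intro i s acc hdrop hsi
    have hlen := congrArg List.length hdrop
    simp at hlen
    have hlt : i < info.length := by omega
    have hget : info[i]'hlt = l := by
      have h0 : (info.drop i)[0]'(by rw [hdrop]; simp) = l := by simp [hdrop]
      simpa using h0
    have hdrop' : info.drop (i + 1) = ls := by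
      have h2 := congrArg (List.drop 1) hdrop
      simpa [List.drop_drop, Nat.add_comm] using h2
    have hcast : ((i : Int) + 1) = ((i + 1 : ℕ) : Int) := by push_cast; ring
    rw [PySem.List.enumerate_cons, List.foldl_cons, hcast]
    by_cases hh : pvIsHeader l = true
    · have hstep : pvSplitStepA info (acc, (s : Int)) ((i : Int), l) =
          (acc ++ [PySem.List.slice info (some (s : Int)) (some (i : Int))], (i : Int)) := by
        simp only [pvSplitStepA, hh, if_true]
      rw [hstep]
      rw [ih (i + 1) i (acc ++ [PySem.List.slice info (some (s : Int)) (some (i : Int))]) hdrop' (by omega)]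
      have hone : (info.drop i).take (i + 1 - i) = [l] := by
        rw [show i + 1 - i = 1 from by omega, hdrop]
        simp
      rw [hone, PySem.List.slice_natCast, pvChunks_cons, if_pos hh]
      simp
    · have hstep : pvSplitStepA info (acc, (s : Int)) ((i : Int), l) = (acc, (s : Int)) := by
        simp only [pvSplitStepA, hh]
        simp
      rw [hstep]
      rw [ih (i + 1) s acc hdrop' (by omega)]
      have hext : (info.drop s).take (i + 1 - s) = (info.drop s).take (i - s) ++ [l] := by
        rw [show i + 1 - s = (i - s) + 1 from by omega, List.take_add_one]
        congr 1
        have h2 : (info.drop s)[i - s]? = info[i]? := by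
          rw [List.getElem?_drop]
          congr 1
          omega
        rw [h2, List.getElem?_eq_getElem hlt, hget]
        rfl
      rw [hext, pvChunks_cons, if_neg hh]

-- a RESI/PRES line is never an ATOM line
theorem pv_header_not_atom (s : String) (h : pvIsHeader s = true) :
    PySem.Str.startswith s "ATOM" = false := by
  apply Bool.eq_false_iff.mpr
  intro hA
  have hA' : ['A', 'T', 'O', 'M'] <+: s.toList := by
    simpa [PySem.Str.startswith, PySem.Chars.startswith] using hA
  have h1 : (['R', 'E', 'S', 'I'] <+: s.toList) ∨ (['P', 'R', 'E', 'S'] <+: s.toList) := by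
    simpa [pvIsHeader, PySem.Str.startswith, PySem.Chars.startswith, Bool.or_eq_true] using h
  obtain ⟨t1, ht1⟩ := hA'
  rcases h1 with ⟨t2, ht2⟩ | ⟨t2, ht2⟩ <;>
  · rw [← ht1] at ht2
    simp at ht2

-- the remove loop commutes with an untouched head
theorem pv_removeAll_cons (L : List String) :
    ∀ (x : String) (xs : List String), (∀ y ∈ L, y ≠ x) →
    L.foldl (fun acc i => (PySem.List.remove? acc i).getD acc) (x :: xs) =
      x :: L.foldl (fun acc i => (PySem.List.remove? acc i).getD acc) xs := by
  induction L with
  | nil => intro x xs _; simp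
  | cons y L ih =>
    intro x xs hne
    have hxy : x ≠ y := fun h => (hne y (by simp)) h.symm
    have hstep : (PySem.List.remove? (x :: xs) y).getD (x :: xs) =
        x :: (PySem.List.remove? xs y).getD xs := by
      rw [PySem.List.remove?_cons_of_ne]
      · cases PySem.List.remove? xs y <;> rfl
      · exact hxy
    rw [List.foldl_cons, List.foldl_cons, hstep]
    exact ih x _ (fun y hy => hne y (by simp [hy]))

-- A's remove loop is a filter
theorem pv_remove_filter (c : List String) :
    (c.filter (fun i => !(PySem.Str.startswith i "ATOM"))).foldl
        (fun acc i => (PySem.List.remove? acc i).getD acc) c =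
      c.filter (fun i => PySem.Str.startswith i "ATOM") := by
  induction c with
  | nil => simp
  | cons x xs ih =>
    by_cases hx : PySem.Str.startswith x "ATOM" = true
    · have hneg : ¬ ((!(PySem.Str.startswith x "ATOM")) = true) := by
        rw [hx]
        decide
      have h1 : (x :: xs).filter (fun i => !(PySem.Str.startswith i "ATOM")) =
          xs.filter (fun i => !(PySem.Str.startswith i "ATOM")) := by
        simp only [List.filter_cons]
        rw [if_neg hneg]
      have hne : ∀ y ∈ xs.filter (fun i => !(PySem.Str.startswith i "ATOM")), y ≠ x := by
        intro y hy hyx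
        have hm := List.of_mem_filter hy
        rw [hyx, hx] at hm
        simp at hm
      rw [h1, pv_removeAll_cons _ x xs hne, ih]
      simp only [List.filter_cons]
      rw [if_pos hx]
    · have hxf : PySem.Str.startswith x "ATOM" = false := eq_false_of_ne_true hx
      have hpos : (!(PySem.Str.startswith x "ATOM")) = true := by rw [hxf]; rfl
      have h1 : (x :: xs).filter (fun i => !(PySem.Str.startswith i "ATOM")) =
          x :: xs.filter (fun i => !(PySem.Str.startswith i "ATOM")) := by
        simp only [List.filter_cons]
        rw [if_pos hpos]
      rw [h1, List.foldl_cons, PySem.List.remove?_cons_self]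
      simp only [Option.getD_some]
      rw [ih]
      simp only [List.filter_cons]
      rw [if_neg hx]

-- A's per-block step on a header-led block
theorem pvBlockStepA_header (hdr : String) (body : List String)
    (d : PySem.Dict String (List (List String))) (hhdr : pvIsHeader hdr = true) :
    pvBlockStepA d (hdr :: body) =
      d.insert (pvKeyOf hdr)
        ((body.filter (fun i => PySem.Str.startswith i "ATOM")).map pvParseLine) := by
  show d.insert (pvKeyOf ((PySem.List.pyGet? (hdr :: body) 0).getD ""))
      ((((hdr :: body).filter (fun i => !(PySem.Str.startswith i "ATOM"))).foldl
          (fun acc i => (PySem.List.remove? acc i).getD acc) (hdr :: body)).map pvParseLine) = _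
  rw [pv_remove_filter]
  have hnotatom : ¬ (PySem.Str.startswith hdr "ATOM" = true) := by
    rw [pv_header_not_atom hdr hhdr]
    exact Bool.false_ne_true
  have h1 : (hdr :: body).filter (fun i => PySem.Str.startswith i "ATOM") =
      body.filter (fun i => PySem.Str.startswith i "ATOM") := by
    simp only [List.filter_cons]
    rw [if_neg hnotatom]
  rw [h1]
  have h2 : (PySem.List.pyGet? (hdr :: body) 0).getD "" = hdr := by
    simp [PySem.List.pyGet?, PySem.List.pyIdx?]
  rw [h2]

-- A's dict fold over header-led chunks equals pvGo
theorem pvA_phase1 (ls : List String) :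
    ∀ (hdr : String) (body : List String) (d : PySem.Dict String (List (List String))),
    pvIsHeader hdr = true →
    (pvChunks (hdr :: body) ls).foldl pvBlockStepA d =
    pvGo d (some (pvKeyOf hdr,
      (body.filter (fun i => PySem.Str.startswith i "ATOM")).map pvParseLine)) ls := by
  induction ls with
  | nil =>
    intro hdr body d hhdr
    show (pvChunks (hdr :: body) []).foldl pvBlockStepA d = _
    rw [show pvChunks (hdr :: body) [] = [hdr :: body] from rfl]
    rw [List.foldl_cons, List.foldl_nil, pvBlockStepA_header hdr body d hhdr]
    rfl
  | cons l ls ih =>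
    intro hdr body d hhdr
    rw [pvChunks_cons, pvGo_cons]
    by_cases hh : pvIsHeader l = true
    · rw [if_pos hh, if_pos hh, List.foldl_cons, pvBlockStepA_header hdr body d hhdr]
      rw [show ([l] : List String) = l :: [] from rfl, ih l [] _ hh]
      rw [show pvFlush d (some (pvKeyOf hdr, (body.filter (fun i => PySem.Str.startswith i "ATOM")).map pvParseLine)) = d.insert (pvKeyOf hdr) ((body.filter (fun i => PySem.Str.startswith i "ATOM")).map pvParseLine) from rfl]
      simp
    · rw [if_neg hh, if_neg hh]
      rw [show (hdr :: body) ++ [l] = hdr :: (body ++ [l]) from by simp]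
      rw [ih hdr (body ++ [l]) d hhdr]
      by_cases ha : PySem.Str.startswith l "ATOM" = true
      · rw [if_pos ha]
        have hfilt : (body ++ [l]).filter (fun i => PySem.Str.startswith i "ATOM") =
            body.filter (fun i => PySem.Str.startswith i "ATOM") ++ [l] := by
          rw [List.filter_append]
          congr 1
          simp only [List.filter_cons]
          rw [if_pos ha]
          rfl
        rw [hfilt]
        simp
      · rw [if_neg ha]
        have hfilt : (body ++ [l]).filter (fun i => PySem.Str.startswith i "ATOM") =
            body.filter (fun i => PySem.Str.startswith i "ATOM") := by
          rw [List.filter_append]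
          simp only [List.filter_cons]
          rw [if_neg ha]
          simp
        rw [hfilt]

theorem pvA_phase0 (ls : List String) :
    ∀ (d : PySem.Dict String (List (List String))),
    ((pvChunks [] ls).tail).foldl pvBlockStepA d = pvGo d none ls := by
  induction ls with
  | nil => intro d; simp [pvChunks, pvGo, pvFlush]
  | cons l ls ih =>
    intro d
    rw [pvChunks_cons, pvGo_cons]
    by_cases hh : pvIsHeader l = true
    · rw [if_pos hh, if_pos hh, List.tail_cons]
      rw [show ([l] : List String) = l :: [] from rfl, pvA_phase1 ls l [] d hh]
      rfl
    · rw [if_neg hh, if_neg hh]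
      rw [List.nil_append, pvChunks_tail ls [l] [], ih d]
      by_cases ha : PySem.Str.startswith l "ATOM" = true
      · rw [if_pos ha]
        rfl
      · rw [if_neg ha]

-- ===== VERDICT (by name: the statement is the Claim_ definition above) =====
theorem fine_top_info_py_spec : Claim_equal_fine_top_info_py := by
  intro info _ _
  unfold Spec_fine_top_info_py fine_top_info_py fine_top_info_py_alt
  have hA := pvA_chunks info info 0 0 [] (by simp) (le_refl 0)
  simp only [Nat.cast_zero, Nat.sub_zero, List.drop_zero, List.take_zero, List.nil_append] at hA
  simp only []
  rw [hA, PySem.List.slice_from_one, pvA_phase0 info PySem.Dict.empty]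
  have hB := pvB_go info PySem.Dict.empty none
  rw [show pvFlush PySem.Dict.empty none = PySem.Dict.empty from rfl] at hB
  rw [show (none : Option (String × List (List String))).map (fun p => p.1) = none from rfl] at hB
  rw [hB]
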